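-- pv_equiv track=rewrite | github.com/Cybercina-tech/PixelCast_signage | BackEnd/bulk_operations/utils.py | validate_item_ids
-- ===== SOURCE A (Python) =====
-- from typing import List, Dict, Any, Optional, Tuple, Callable
--
-- class BulkOperationError(Exception):
--     """Custom exception for bulk operation errors"""
--     pass
--
-- def validate_item_ids(item_ids: List[str], max_items: int = 1000) -> Tuple[List[str], List[str]]:
--     """
--     Validate and sanitize item IDs.
--
--     Args:
--         item_ids: List of item IDs (can be UUIDs or other IDs)
--         max_items: Maximum number of items allowed (default: 1000)
--
--     Returns:
--         Tuple of (valid_ids, invalid_ids)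
--
--     Raises:
--         BulkOperationError: If validation fails critically
--     """
--     if not item_ids:
--         raise BulkOperationError("No item IDs provided")
--
--     if len(item_ids) > max_items:
--         raise BulkOperationError(
--             f"Too many items. Maximum {max_items} items allowed, got {len(item_ids)}"
--         )
--
--     # Remove duplicates while preserving order
--     seen = set()
--     unique_ids = []
--     for item_id in item_ids:
--         if item_id not in seen:
--             seen.add(item_id)
--             unique_ids.append(item_id)
--
--     # Validate format (basic UUID validation)
--     valid_ids = []
--     invalid_ids = []
--
--     for item_id in unique_ids:
--         if not item_id or not isinstance(item_id, str):
--             invalid_ids.append(str(item_id) if item_id else 'empty')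
--             continue
--
--         # Basic validation: should be alphanumeric with dashes/underscores (UUID format)
--         cleaned_id = item_id.strip()
--         if len(cleaned_id) < 8 or len(cleaned_id) > 128:
--             invalid_ids.append(item_id)
--             continue
--
--         # Check for potentially malicious content
--         if any(char in cleaned_id for char in ['<', '>', '"', "'", ';', '&', '|', '$', '`']):
--             invalid_ids.append(item_id)
--             continue
--
--         valid_ids.append(cleaned_id)
--
--     return valid_ids, invalid_ids
-- ===== SOURCE B (Python) =====
-- from typing import List, Tuple
--
-- class BulkOperationError(Exception):
--     """Custom exception for bulk operation errors"""
--     pass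
--
-- MALICIOUS = '<>"\';&|$`'
--
-- def _verdict(item_id):
--     """Pure classifier: (ok, value to emit)."""
--     if not item_id:
--         return (False, 'empty')
--     cleaned = item_id.strip()
--     ok = 8 <= len(cleaned) <= 128 and not (set(cleaned) & set(MALICIOUS))
--     return (ok, cleaned if ok else item_id)
--
-- def validate_item_ids(item_ids: List[str], max_items: int = 1000) -> Tuple[List[str], List[str]]:
--     """Filter-based dedup (no seen set) + pure verdict map + partition by comprehension."""
--     if not item_ids:
--         raise BulkOperationError("No item IDs provided")
--     if len(item_ids) > max_items:
--         raise BulkOperationError(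
--             f"Too many items. Maximum {max_items} items allowed, got {len(item_ids)}"
--         )
--     # dedup preserving order, without any seen-set: repeatedly take the head
--     # and filter all its later duplicates out of the remaining tail
--     unique = []
--     pending = list(item_ids)
--     while pending:
--         head = pending[0]
--         unique.append(head)
--         pending = [x for x in pending[1:] if x != head]
--     results = [_verdict(i) for i in unique]
--     return ([v for ok, v in results if ok], [v for ok, v in results if not ok])
-- ===== Notes on version B (the rewrite author's own statement) =====
-- stated objective: alternative
-- what changed: Replaces A's seen-set dedup and interleaved classify-with-continue loop by a head-and-filter dedup (no seen structure: repeatedly emit the head and filter its duplicates from the tail), a pure verdict function mapped over the unique ids, and two partition comprehensions; the malicious-character scan becomes a set-intersection test.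
import Mathlib
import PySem

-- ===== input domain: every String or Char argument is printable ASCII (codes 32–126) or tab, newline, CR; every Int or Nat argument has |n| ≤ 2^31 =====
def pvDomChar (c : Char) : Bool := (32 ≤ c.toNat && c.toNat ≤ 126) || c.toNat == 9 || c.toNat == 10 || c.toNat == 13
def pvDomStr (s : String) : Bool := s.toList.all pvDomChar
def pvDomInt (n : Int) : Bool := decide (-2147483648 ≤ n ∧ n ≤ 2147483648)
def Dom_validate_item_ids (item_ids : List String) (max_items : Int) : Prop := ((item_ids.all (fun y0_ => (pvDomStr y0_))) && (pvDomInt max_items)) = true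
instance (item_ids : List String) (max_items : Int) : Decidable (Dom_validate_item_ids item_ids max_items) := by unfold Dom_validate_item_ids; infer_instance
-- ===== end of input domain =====

-- B replaces A's seen-set dedup + interleaved classification loop by a head-and-filter
-- dedup, a pure verdict function mapped over the unique ids, and two partition passes.

-- ===== PORT A =====
-- the list of malicious characters A tests with `char in cleaned_id`
def pvBadStrsA : List String := ["<", ">", "\"", "'", ";", "&", "|", "$", "`"]

-- A's first loop: dedup preserving order (state: seen set, unique_ids accumulator)
def pvDedupA (seen : PySem.Set String) (acc : List String) : List String → List String
  | [] => acc
  | id :: rest =>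
    if PySem.Set.contains seen id then pvDedupA seen acc rest
    else pvDedupA (PySem.Set.add seen id) (acc ++ [id]) rest

-- A's second loop: classify each unique id (valid_ids, invalid_ids accumulators)
def pvClassifyA (valid invalid : List String) : List String → List String × List String
  | [] => (valid, invalid)
  | id :: rest =>
    if id = "" then
      -- `not item_id or not isinstance(item_id, str)`: id is a str, so = falsy; appends 'empty'
      pvClassifyA valid (invalid ++ ["empty"]) rest
    else
      let cleaned := PySem.Str.strip id
      if PySem.Str.len cleaned < 8 ∨ 128 < PySem.Str.len cleaned then
        pvClassifyA valid (invalid ++ [id]) rest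
      else if pvBadStrsA.any (fun ch => PySem.Str.isIn ch cleaned) then
        pvClassifyA valid (invalid ++ [id]) rest
      else
        pvClassifyA (valid ++ [cleaned]) invalid rest

def validate_item_ids (item_ids : List String) (max_items : Int) : List String × List String :=
  if item_ids = [] then ([], [])                       -- raise BulkOperationError (outside Pre_)
  else if max_items < (item_ids.length : Int) then ([], [])   -- raise BulkOperationError (outside Pre_)
  else pvClassifyA [] [] (pvDedupA PySem.Set.empty [] item_ids)

-- ===== PORT B =====
def pvMaliciousB : String := "<>\"';&|$`"

-- B's pure classifier: (ok, value to emit); `set(cleaned) & set(MALICIOUS)` truthiness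
-- is the intersection Set being nonempty (exact: truthiness of a set = non-emptiness)
def pvVerdictB (id : String) : Bool × String :=
  if id = "" then (false, "empty")
  else
    let cleaned := PySem.Str.strip id
    let ok := decide (8 ≤ PySem.Str.len cleaned ∧ PySem.Str.len cleaned ≤ 128)
              && (PySem.Set.inter (PySem.Set.ofList cleaned.toList)
                    (PySem.Set.ofList pvMaliciousB.toList)).isEmpty
    (ok, if ok then cleaned else id)

-- B's while loop: emit the head, filter its duplicates out of the pending tail
def pvDedupB (unique : List String) (pending : List String) : List String :=
  match pending with
  | [] => unique
  | head :: t => pvDedupB (unique ++ [head]) (t.filter (fun x => x ≠ head))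
termination_by pending.length
decreasing_by simpa using Nat.lt_succ_of_le (le_trans (List.length_filter_le _ _) (le_of_eq List.length_attach))

def validate_item_ids_alt (item_ids : List String) (max_items : Int) : List String × List String :=
  if item_ids = [] then ([], [])                       -- raise BulkOperationError (outside Pre_)
  else if max_items < (item_ids.length : Int) then ([], [])   -- raise BulkOperationError (outside Pre_)
  else
    let results := (pvDedupB [] item_ids).map pvVerdictB
    ((results.filter (·.1)).map (·.2),
     (results.filter (fun r => !r.1)).map (·.2))

-- ===== PRECONDITION & SPEC =====
-- A raises BulkOperationError on an empty list and when len(item_ids) > max_items; Pre_ excludes exactly those.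
def Pre_validate_item_ids (item_ids : List String) (max_items : Int) : Prop :=
  item_ids ≠ [] ∧ (item_ids.length : Int) ≤ max_items
instance (item_ids : List String) (max_items : Int) : Decidable (Pre_validate_item_ids item_ids max_items) := by unfold Pre_validate_item_ids; infer_instance
def pvWitness_validate_item_ids : List String × Int := (["abcdefgh", " x<y;z "], 10)

def Spec_validate_item_ids (item_ids : List String) (max_items : Int) (out : List String × List String) : Prop := out = validate_item_ids_alt item_ids max_items
instance (item_ids : List String) (max_items : Int) (out : List String × List String) : Decidable (Spec_validate_item_ids item_ids max_items out) := by unfold Spec_validate_item_ids; infer_instance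

-- ===== CLAIM =====
def Claim_equal_validate_item_ids : Prop := ∀ (item_ids : List String) (max_items : Int), Dom_validate_item_ids item_ids max_items → Pre_validate_item_ids item_ids max_items → Spec_validate_item_ids item_ids max_items (validate_item_ids item_ids max_items)

-- ===== LEMMAS AND PROOFS =====

-- A's and B's malicious-character tests agree: some one-char sentinel string occurs in
-- cleaned iff the char-set intersection of cleaned with the sentinel chars is nonempty.
theorem pvIsIn_singleton (ch : Char) (l : List Char) :
    PySem.Chars.isIn [ch] l = l.contains ch := by
  rw [Bool.eq_iff_iff]; simp [PySem.Chars.isIn_iff_infix, List.singleton_infix_iff]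

theorem pvBad_eq (c : String) :
    pvBadStrsA.any (fun ch => PySem.Str.isIn ch c)
      = !(PySem.Set.inter (PySem.Set.ofList c.toList)
            (PySem.Set.ofList pvMaliciousB.toList)).isEmpty := by
  rw [Bool.eq_iff_iff]
  have hL : pvBadStrsA.any (fun ch => PySem.Str.isIn ch c) = true
      ↔ ∃ x, x ∈ c.toList ∧ x ∈ pvMaliciousB.toList := by
    simp [pvBadStrsA, pvMaliciousB, PySem.Str.isIn, pvIsIn_singleton]
    constructor
    · intro h; rcases h with h|h|h|h|h|h|h|h|h <;> exact ⟨_, h, by simp⟩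
    · rintro ⟨x, hx, hm⟩
      rcases hm with h|h|h|h|h|h|h|h|h <;> (subst h; tauto)
  have hR : (!(PySem.Set.inter (PySem.Set.ofList c.toList)
        (PySem.Set.ofList pvMaliciousB.toList)).isEmpty) = true
      ↔ ∃ x, x ∈ c.toList ∧ x ∈ pvMaliciousB.toList := by
    rw [Bool.not_eq_true', List.isEmpty_eq_false_iff]
    constructor
    · intro h
      obtain ⟨x, hx⟩ := List.exists_mem_of_ne_nil _ h
      rw [PySem.Set.mem_inter] at hx
      exact ⟨x, by simpa [PySem.Set.mem_ofList] using hx⟩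
    · rintro ⟨x, h1, h2⟩
      exact List.ne_nil_of_mem (a := x)
        (by rw [PySem.Set.mem_inter]; simp [PySem.Set.mem_ofList, h1, h2])
  rw [hL, hR]

-- dedup equivalence: A's seen-set dedup equals B's head-and-filter dedup of the
-- pending list with the already-seen elements filtered away
theorem pvDedup_eq (ids : List String) (seen : PySem.Set String) (acc : List String) :
    pvDedupA seen acc ids
      = pvDedupB acc (ids.filter (fun x => !(PySem.Set.contains seen x))) := by
  induction ids generalizing seen acc with
  | nil => simp only [pvDedupA, List.filter_nil]; rw [pvDedupB]
  | cons h t ih =>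
    simp only [pvDedupA, List.filter_cons]
    by_cases hs : PySem.Set.contains seen h
    · simp only [hs, ite_true, Bool.not_true, Bool.false_eq_true, ite_false]
      exact ih seen acc
    · simp only [hs, Bool.false_eq_true, ite_false, Bool.not_false, ite_true]
      rw [ih]
      conv_rhs => rw [pvDedupB]
      congr 1
      rw [List.filter_filter]
      apply List.filter_congr
      intro x _
      rw [Bool.eq_iff_iff]
      simp [PySem.Set.mem_add, and_comm]

-- classification equivalence: A's classify loop equals B's verdict-map + two partitions
theorem pvClassify_eq (us : List String) (valid invalid : List String) :
    pvClassifyA valid invalid us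
      = (valid ++ ((us.map pvVerdictB).filter (·.1)).map (·.2),
         invalid ++ ((us.map pvVerdictB).filter (fun r => !r.1)).map (·.2)) := by
  induction us generalizing valid invalid with
  | nil => simp [pvClassifyA]
  | cons id rest ih =>
    simp only [pvClassifyA, List.map_cons]
    by_cases h0 : id = ""
    · simp only [h0, ite_true]
      rw [ih]
      simp [pvVerdictB]
    · simp only [h0, ite_false]
      have hv : pvVerdictB id =
          (decide (8 ≤ PySem.Str.len (PySem.Str.strip id) ∧
              PySem.Str.len (PySem.Str.strip id) ≤ 128)
            && (PySem.Set.inter (PySem.Set.ofList (PySem.Str.strip id).toList)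
                  (PySem.Set.ofList pvMaliciousB.toList)).isEmpty,
           if (decide (8 ≤ PySem.Str.len (PySem.Str.strip id) ∧
              PySem.Str.len (PySem.Str.strip id) ≤ 128)
            && (PySem.Set.inter (PySem.Set.ofList (PySem.Str.strip id).toList)
                  (PySem.Set.ofList pvMaliciousB.toList)).isEmpty) = true
           then PySem.Str.strip id else id) := by
        simp [pvVerdictB, h0]
      by_cases hlen : PySem.Str.len (PySem.Str.strip id) < 8 ∨ 128 < PySem.Str.len (PySem.Str.strip id)
      · have hd : decide (8 ≤ PySem.Str.len (PySem.Str.strip id) ∧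
              PySem.Str.len (PySem.Str.strip id) ≤ 128) = false := by
          rw [decide_eq_false_iff_not]; omega
        simp only [hlen, ite_true]
        rw [ih, hv, hd]
        simp
      · have hd : decide (8 ≤ PySem.Str.len (PySem.Str.strip id) ∧
              PySem.Str.len (PySem.Str.strip id) ≤ 128) = true := by
          rw [decide_eq_true_eq]; omega
        simp only [hlen, ite_false]
        by_cases hbad : pvBadStrsA.any (fun ch => PySem.Str.isIn ch (PySem.Str.strip id)) = true
        · have hie : (PySem.Set.inter (PySem.Set.ofList (PySem.Str.strip id).toList)
                  (PySem.Set.ofList pvMaliciousB.toList)).isEmpty = false := by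
            have := pvBad_eq (PySem.Str.strip id)
            rw [hbad] at this
            cases hE : (PySem.Set.inter (PySem.Set.ofList (PySem.Str.strip id).toList)
                  (PySem.Set.ofList pvMaliciousB.toList)).isEmpty
            · rfl
            · rw [hE] at this; simp at this
          simp only [hbad, ite_true]
          rw [ih, hv, hd, hie]
          simp
        · simp only [Bool.not_eq_true] at hbad
          have hie : (PySem.Set.inter (PySem.Set.ofList (PySem.Str.strip id).toList)
                  (PySem.Set.ofList pvMaliciousB.toList)).isEmpty = true := by
            have := pvBad_eq (PySem.Str.strip id)
            rw [hbad] at this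
            cases hE : (PySem.Set.inter (PySem.Set.ofList (PySem.Str.strip id).toList)
                  (PySem.Set.ofList pvMaliciousB.toList)).isEmpty
            · rw [hE] at this; simp at this
            · rfl
          simp only [hbad, Bool.false_eq_true, ite_false]
          rw [ih, hv, hd, hie]
          simp

-- ===== VERDICT =====
theorem validate_item_ids_spec : Claim_equal_validate_item_ids := by
  intro item_ids max_items _ _
  unfold Spec_validate_item_ids validate_item_ids validate_item_ids_alt
  by_cases h1 : item_ids = []
  · simp [h1]
  · by_cases h2 : max_items < (item_ids.length : Int)
    · simp [h1, h2]
    · simp only [h1, h2, ite_false]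
      rw [pvDedup_eq]
      have : item_ids.filter (fun x => !(PySem.Set.contains PySem.Set.empty x)) = item_ids := by
        apply List.filter_eq_self.2
        intro x _
        simp [PySem.Set.empty, PySem.Set.contains]
      rw [this, pvClassify_eq]
      simp
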